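-- pv_equiv track=rewrite | github.com/warlord71-bd/emart-platform | apps/web/scripts/generate-missing-descriptions.py | get_origin
-- ===== SOURCE A (Python) =====
-- def get_origin(brand):
--     b = brand.lower()
--     if any(x in b for x in ["rohto", "mentholatum", "biore", "shiseido", "hada labo", "ryo", "fancl"]):
--         return "Japan"
--     if any(x in b for x in ["cerave", "neutrogena", "paula's choice", "the ordinary", "cetaphil", "nivea"]):
--         return "USA"
--     if any(x in b for x in ["bioderma", "la roche", "vichy", "avene"]):
--         return "France"
--     return "Korea"
-- ===== SOURCE B (Python) =====
-- _TABLE = [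
--     ("rohto", "Japan"), ("mentholatum", "Japan"), ("biore", "Japan"),
--     ("shiseido", "Japan"), ("hada labo", "Japan"), ("ryo", "Japan"),
--     ("fancl", "Japan"),
--     ("cerave", "USA"), ("neutrogena", "USA"), ("paula's choice", "USA"),
--     ("the ordinary", "USA"), ("cetaphil", "USA"), ("nivea", "USA"),
--     ("bioderma", "France"), ("la roche", "France"), ("vichy", "France"),
--     ("avene", "France"),
-- ]
--
-- _PRIORITY = ["Japan", "USA", "France"]
--
-- def get_origin(brand):
--     b = brand.lower()
--     # phase 1: collect the full set of matched countries (no short-circuit)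
--     matched = {country for kw, country in _TABLE if kw in b}
--     # phase 2: resolve by fixed country priority
--     for country in _PRIORITY:
--         if country in matched:
--             return country
--     return "Korea"
-- ===== Notes on version B (the rewrite author's own statement) =====
-- stated objective: alternative
-- what changed: Instead of three short-circuiting any()-branches, B first computes the complete SET of countries whose keywords occur in the brand (one full scan, no early exit), then resolves it against a fixed priority list (Japan, USA, France) in a second phase; equivalent because group order in A equals the priority order.
import Mathlib
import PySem

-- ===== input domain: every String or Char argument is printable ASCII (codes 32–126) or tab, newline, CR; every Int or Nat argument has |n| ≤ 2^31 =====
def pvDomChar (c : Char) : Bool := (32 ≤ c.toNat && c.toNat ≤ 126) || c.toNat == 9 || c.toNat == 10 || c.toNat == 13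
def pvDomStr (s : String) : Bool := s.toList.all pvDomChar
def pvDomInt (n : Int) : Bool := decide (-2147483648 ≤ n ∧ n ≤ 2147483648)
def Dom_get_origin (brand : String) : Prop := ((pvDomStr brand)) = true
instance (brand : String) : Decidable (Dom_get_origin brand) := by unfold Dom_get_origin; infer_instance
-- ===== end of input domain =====

-- B is a two-phase rewrite: first collect the full set of matched countries, then resolve by a fixed priority list.

-- ===== PORT A =====
def get_origin (brand : String) : String :=
  let b := PySem.Str.lower brand
  if ["rohto", "mentholatum", "biore", "shiseido", "hada labo", "ryo", "fancl"].any
      (fun x => PySem.Str.isIn x b) then "Japan"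
  else if ["cerave", "neutrogena", "paula's choice", "the ordinary", "cetaphil", "nivea"].any
      (fun x => PySem.Str.isIn x b) then "USA"
  else if ["bioderma", "la roche", "vichy", "avene"].any
      (fun x => PySem.Str.isIn x b) then "France"
  else "Korea"

-- ===== PORT B =====
def originTable : List (String × String) :=
  [("rohto", "Japan"), ("mentholatum", "Japan"), ("biore", "Japan"),
   ("shiseido", "Japan"), ("hada labo", "Japan"), ("ryo", "Japan"),
   ("fancl", "Japan"),
   ("cerave", "USA"), ("neutrogena", "USA"), ("paula's choice", "USA"),
   ("the ordinary", "USA"), ("cetaphil", "USA"), ("nivea", "USA"),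
   ("bioderma", "France"), ("la roche", "France"), ("vichy", "France"),
   ("avene", "France")]

def originPriority : List String := ["Japan", "USA", "France"]

-- phase 1: the set of matched countries ({country for kw, country in _TABLE if kw in b})
def matchedCountries (b : String) : PySem.Set String :=
  PySem.Set.ofList ((originTable.filter (fun p => PySem.Str.isIn p.1 b)).map Prod.snd)

-- phase 2: the priority loop
def pickPriority (m : PySem.Set String) : List String → String
  | [] => "Korea"
  | c :: rest => if PySem.Set.contains m c then c else pickPriority m rest

def get_origin_alt (brand : String) : String :=
  pickPriority (matchedCountries (PySem.Str.lower brand)) originPriority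

-- ===== PRECONDITION & SPEC =====
def Spec_get_origin (brand : String) (out : String) : Prop := out = get_origin_alt brand
instance (brand : String) (out : String) : Decidable (Spec_get_origin brand out) := by unfold Spec_get_origin; infer_instance

-- ===== CLAIM =====
def Claim_equal_get_origin : Prop := ∀ (brand : String), Dom_get_origin brand → Spec_get_origin brand (get_origin brand)

-- ===== LEMMAS AND PROOFS =====

-- A country is in the matched set iff some keyword mapped to it in the table occurs in b.
theorem contains_matched (b c : String) :
    PySem.Set.contains (matchedCountries b) c
      = (originTable.any (fun p => PySem.Str.isIn p.1 b && p.2 == c)) := by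
  unfold matchedCountries
  rw [Bool.eq_iff_iff]
  simp [List.mem_filter, List.any_eq_true]

-- ===== VERDICT =====
theorem get_origin_spec : Claim_equal_get_origin := by
  intro brand _
  unfold Spec_get_origin get_origin get_origin_alt
  dsimp only
  simp only [originPriority, pickPriority, contains_matched]
  simp only [originTable, List.any_cons, List.any_nil]
  split_ifs <;> simp_all
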